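-- pv_equiv track=rewrite | github.com/yyoungl/problems | 프로그래머스/lv0/120882. 등수 매기기/등수 매기기.py | solution
-- ===== SOURCE A (Python) =====
-- def solution(score):
--     N = len(score)
--     rank = [1] * N
--     sums = []
--     for x in score:
--         sums.append(x[0]+x[1])
--
--     for i in range(N):
--         for j in range(0, i):
--             if sums[j] > sums[i]:
--                 rank[i]+=1
--         for j in range(i+1, N):
--             if sums[j] > sums[i]:
--                 rank[i]+=1
--     return rank
-- ===== SOURCE B (Python) =====
-- def solution(score):
--     sums = [x[0] + x[1] for x in score]
--     first = {}
--     for i, s in enumerate(sorted(sums, reverse=True)):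
--         if s not in first:
--             first[s] = i + 1
--     return [first[s] for s in sums]
-- ===== Notes on version B (the rewrite author's own statement) =====
-- stated objective: faster
-- what changed: Replaced the all-pairs comparison of sums by one descending sort plus a first-occurrence-index dict, so each rank is read off as 1 + position of its sum in the sorted order.
import Mathlib
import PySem

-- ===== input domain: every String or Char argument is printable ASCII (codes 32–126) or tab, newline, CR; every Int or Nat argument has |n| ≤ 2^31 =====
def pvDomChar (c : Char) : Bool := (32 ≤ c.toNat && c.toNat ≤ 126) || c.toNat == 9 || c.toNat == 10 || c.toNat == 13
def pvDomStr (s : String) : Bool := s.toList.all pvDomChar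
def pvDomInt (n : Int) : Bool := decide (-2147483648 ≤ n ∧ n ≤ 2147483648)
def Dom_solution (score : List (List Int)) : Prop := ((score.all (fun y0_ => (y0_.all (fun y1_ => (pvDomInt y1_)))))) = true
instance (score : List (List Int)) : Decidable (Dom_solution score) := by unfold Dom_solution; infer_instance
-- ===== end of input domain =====

-- B replaces A's all-pairs comparison of sums by one descending sort plus a first-occurrence
-- dict, reading each rank as 1 + position of its sum in the sorted order (measured faster).

-- ===== PORT A =====
-- pyGetD is exact under Pre_solution (every row has at least two entries).
def solution (score : List (List Int)) : List Int :=
  let N : Int := PySem.List.len score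
  let rank0 : List Int := List.replicate score.length (1 : Int)
  let sums : List Int :=
    score.foldl (fun acc x => acc ++ [PySem.List.pyGetD x 0 0 + PySem.List.pyGetD x 1 0]) []
  (PySem.List.pyRange 0 N 1).foldl (fun rank i =>
    let rank :=
      (PySem.List.pyRange 0 i 1).foldl (fun rank j =>
        if PySem.List.pyGetD sums j 0 > PySem.List.pyGetD sums i 0 then
          PySem.List.pySetD rank i (PySem.List.pyGetD rank i 0 + 1)
        else rank) rank
    (PySem.List.pyRange (i + 1) N 1).foldl (fun rank j =>
      if PySem.List.pyGetD sums j 0 > PySem.List.pyGetD sums i 0 then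
        PySem.List.pySetD rank i (PySem.List.pyGetD rank i 0 + 1)
      else rank) rank) rank0

-- ===== PORT B =====
def solution_alt (score : List (List Int)) : List Int :=
  let sums : List Int := score.map (fun x => PySem.List.pyGetD x 0 0 + PySem.List.pyGetD x 1 0)
  let first : PySem.Dict Int Int :=
    (PySem.List.enumerate (PySem.List.sorted sums (fun s => s) true) 0).foldl
      (fun d p => if d.contains p.2 then d else d.insert p.2 (p.1 + 1)) PySem.Dict.empty
  sums.map (fun s => first.getD s 0)

-- ===== PRECONDITION & SPEC =====
-- Pre_ excludes only rows with fewer than two entries: there Python A (x[0]+x[1]) raises IndexError.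
def Pre_solution (score : List (List Int)) : Prop := ∀ x ∈ score, 2 ≤ x.length
instance (score : List (List Int)) : Decidable (Pre_solution score) := by
  unfold Pre_solution; infer_instance
def pvWitness_solution : List (List Int) := [[1, 2], [3, 4], [3, 0]]
def Spec_solution (score : List (List Int)) (out : List Int) : Prop := out = solution_alt score
instance (score : List (List Int)) (out : List Int) : Decidable (Spec_solution score out) := by
  unfold Spec_solution; infer_instance

-- ===== CLAIM (what is proved, stated in full; the proofs are below) =====
def Claim_equal_solution : Prop :=
  ∀ (score : List (List Int)), Dom_solution score → Pre_solution score →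
    Spec_solution score (solution score)

-- ===== LEMMAS AND PROOFS =====

-- the common normal form: each rank is 1 + (number of strictly larger sums)
def pvTarget (sums : List Int) : List Int :=
  sums.map (fun s => 1 + ((sums.countP (fun t => s < t) : Nat) : Int))

-- ---- B side ----

-- the dict-building loop: lookup of the result in terms of the first-occurrence index
theorem pv_dictFold_getD (l : List Int) (n : Int) (d : PySem.Dict Int Int) (s : Int) :
    ((PySem.List.enumerate l n).foldl
        (fun d p => if d.contains p.2 then d else d.insert p.2 (p.1 + 1)) d).getD s 0
      = if d.contains s then d.getD s 0 else
          (match PySem.List.index? l s with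
           | some k => n + k + 1
           | none => 0) := by
  induction l generalizing n d with
  | nil =>
    rw [PySem.List.enumerate_nil]
    simp only [List.foldl_nil]
    by_cases hc : d.contains s = true
    · simp [hc]
    · rw [PySem.List.index?_eq_idxOf?]
      simp [hc, PySem.Dict.getD_of_not_contains d 0 (by simpa using hc)]
  | cons a t ih =>
    rw [PySem.List.enumerate_cons, List.foldl_cons]
    by_cases ha : a = s
    · subst ha
      by_cases hc : d.contains a = true
      · rw [if_pos hc, ih]
        simp [hc]
      · rw [if_neg hc, ih]
        rw [PySem.List.index?_cons_self]
        simp only [PySem.Dict.contains_insert_self, if_true, PySem.Dict.getD_insert_self]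
        simp [hc]
    · have hidx : PySem.List.index? (a :: t) s = Option.map (· + 1) (PySem.List.index? t s) :=
        PySem.List.index?_cons_of_ne t ha
      by_cases hc : d.contains a = true
      · rw [if_pos hc, ih, hidx]
        cases PySem.List.index? t s with
        | none => simp
        | some k => simp; ring
      · rw [if_neg hc, ih, hidx]
        have hcs : (d.insert a (n + 1)).contains s = d.contains s := by
          rw [PySem.Dict.contains_insert]
          have : (s == a) = false := by simp [Ne.symm ha]
          simp [this]
        rw [hcs]
        by_cases hds : d.contains s = true
        · simp only [hds, if_true]
          rw [PySem.Dict.getD_insert]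
          simp [Ne.symm ha]
        · simp only [hds, if_false]
          cases PySem.List.index? t s with
          | none => simp
          | some k => simp; ring

-- in a descending-sorted list, the first occurrence of a member sits right after the strictly larger entries
theorem pv_index?_sorted_desc (l : List Int) (s : Int)
    (hp : l.Pairwise (fun a b => b ≤ a)) (hm : s ∈ l) :
    PySem.List.index? l s = some (l.countP (fun t => s < t)) := by
  induction l with
  | nil => cases hm
  | cons a t ih =>
    rcases List.pairwise_cons.mp hp with ⟨hall, hpt⟩
    by_cases ha : a = s
    · subst ha
      rw [PySem.List.index?_cons_self]
      have h0 : t.countP (fun t => a < t) = 0 :=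
        List.countP_eq_zero.mpr (fun x hx => by simp [not_lt.mpr (hall x hx)])
      simp [List.countP_cons, h0]
    · have hst : s ∈ t := by cases hm with | head => exact absurd rfl ha | tail _ h => exact h
      have hlt : s < a := lt_of_le_of_ne (hall s hst) (Ne.symm ha)
      rw [PySem.List.index?_cons_of_ne t ha, ih hpt hst]
      simp [List.countP_cons, hlt, Nat.add_comm]

theorem pv_alt_eq_target (score : List (List Int)) :
    solution_alt score
      = pvTarget (score.map (fun x => PySem.List.pyGetD x 0 0 + PySem.List.pyGetD x 1 0)) := by
  unfold solution_alt pvTarget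
  set sums := score.map (fun x => PySem.List.pyGetD x 0 0 + PySem.List.pyGetD x 1 0) with hs
  apply List.map_congr_left
  intro s hsm
  set desc := PySem.List.sorted sums (fun s => s) true with hd
  have hmem : s ∈ desc := (PySem.List.mem_sorted sums (fun s => s) true s).mpr hsm
  have hidx : PySem.List.index? desc s = some (desc.countP (fun t => s < t)) :=
    pv_index?_sorted_desc desc s (PySem.List.sorted_pairwise_rev sums (fun s => s)) hmem
  have hcnt : desc.countP (fun t => s < t) = sums.countP (fun t => s < t) :=
    (PySem.List.sorted_perm sums (fun s => s) true).countP_eq _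
  rw [pv_dictFold_getD]
  simp only [PySem.Dict.contains_empty, if_false]
  rw [hidx, hcnt]
  simp [Int.add_comm]

-- ---- A side ----

-- the inner j-loops: a fold that only ever bumps slot i collapses to a single set of slot i
theorem pv_inner_fold (sums rank : List Int) (i m : Nat) (a : Int)
    (hlen : i < rank.length) :
    ((List.range m).map (fun (k : Nat) => a + (k : Int))).foldl
        (fun rank j =>
          if PySem.List.pyGetD sums j 0 > PySem.List.pyGetD sums (i : Int) 0 then
            PySem.List.pySetD rank (i : Int) (PySem.List.pyGetD rank (i : Int) 0 + 1)
          else rank) rank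
      = PySem.List.pySetD rank (i : Int)
          (PySem.List.pyGetD rank (i : Int) 0 +
            (((List.range m).map (fun (k : Nat) => a + (k : Int))).countP
              (fun j => PySem.List.pyGetD sums j 0 > PySem.List.pyGetD sums (i : Int) 0) : Nat)) := by
  induction m with
  | zero =>
    simp only [List.range_zero, List.map_nil, List.foldl_nil, List.countP_nil,
      Nat.cast_zero, add_zero]
    rw [PySem.List.pySetD_natCast, PySem.List.pyGetD_natCast,
      List.getD_eq_getElem _ _ hlen, List.set_getElem_self]
  | succ m ih =>
    rw [List.range_succ, List.map_append, List.foldl_append, List.countP_append, ih]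
    simp only [List.map_cons, List.map_nil, List.foldl_cons, List.foldl_nil,
      List.countP_cons, List.countP_nil]
    by_cases hc : PySem.List.pyGetD sums (a + (m : Int)) 0 > PySem.List.pyGetD sums (i : Int) 0
    · rw [if_pos hc]
      rw [PySem.List.pyGetD_pySetD_natCast _ _ _ _ _ hlen]
      simp only [PySem.List.pySetD_natCast, List.set_set]
      have : (decide (PySem.List.pyGetD sums (i : Int) 0 < PySem.List.pyGetD sums (a + (m : Int)) 0)) = true := by
        simpa using hc
      rw [this]
      simp only [if_true]
      congr 1
      push_cast
      ring
    · rw [if_neg hc]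
      have : (decide (PySem.List.pyGetD sums (i : Int) 0 < PySem.List.pyGetD sums (a + (m : Int)) 0)) = false := by
        simpa using hc
      rw [this]
      simp

-- pyRange with natural bounds, in the exact shape pv_inner_fold consumes
theorem pv_range_nat (a b : Nat) :
    PySem.List.pyRange (a : Int) (b : Int) 1
      = (List.range (b - a)).map (fun (k : Nat) => (a : Int) + (k : Int)) := by
  have h : ((b : Int) - (a : Int)).toNat = b - a := by omega
  rw [PySem.List.pyRange_one, h]

-- counting the strictly larger sums over the two index ranges = counting them over the list
theorem pv_count_split (sums : List Int) (m : Nat) (hm : m < sums.length) :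
    ((List.range (m - 0)).map (fun (k : Nat) => ((0 : Nat) : Int) + (k : Int))).countP
        (fun j => PySem.List.pyGetD sums j 0 > PySem.List.pyGetD sums (m : Int) 0)
      + ((List.range (sums.length - (m + 1))).map (fun (k : Nat) => (((m + 1 : Nat) : Nat) : Int) + (k : Int))).countP
          (fun j => PySem.List.pyGetD sums j 0 > PySem.List.pyGetD sums (m : Int) 0)
      = sums.countP (fun t => PySem.List.pyGetD sums (m : Int) 0 < t) := by
  have hmap : (List.map (fun j => PySem.List.pyGetD sums j 0)
      (PySem.List.pyRange 0 (sums.length : Int) 1)).countP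
        (fun t => PySem.List.pyGetD sums (m : Int) 0 < t)
      = sums.countP (fun t => PySem.List.pyGetD sums (m : Int) 0 < t) := by
    have h := PySem.List.map_pyGetD_pyRange_zero sums 0
    rw [PySem.List.len_eq] at h
    rw [h]
  have hsplit : PySem.List.pyRange 0 (sums.length : Int) 1
      = PySem.List.pyRange 0 (m : Int) 1
        ++ (m : Int) :: PySem.List.pyRange ((m : Int) + 1) (sums.length : Int) 1 := by
    have e1 := PySem.List.pyRange_one_append 0 (m : Int) (sums.length : Int)
      (by exact_mod_cast Nat.zero_le m) (by exact_mod_cast hm.le)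
    have e2 : PySem.List.pyRange (m : Int) (sums.length : Int)
        = (m : Int) :: PySem.List.pyRange ((m : Int) + 1) (sums.length : Int) :=
      PySem.List.pyRange_one_cons (by exact_mod_cast hm)
    rw [e1, e2]
  have h1 : PySem.List.pyRange 0 (m : Int) 1
      = (List.range (m - 0)).map (fun (k : Nat) => ((0 : Nat) : Int) + (k : Int)) := by
    have := pv_range_nat 0 m
    simpa using this
  have h2 : PySem.List.pyRange ((m : Int) + 1) (sums.length : Int) 1
      = (List.range (sums.length - (m + 1))).map (fun (k : Nat) => (((m + 1 : Nat) : Nat) : Int) + (k : Int)) := by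
    have := pv_range_nat (m + 1) sums.length
    push_cast at this ⊢
    simpa using this
  rw [← hmap, hsplit, List.map_append, List.countP_append, List.map_cons, List.countP_cons,
    h1, h2]
  simp only [List.countP_map]
  have hself : (decide (PySem.List.pyGetD sums (m : Int) 0 < PySem.List.pyGetD sums (m : Int) 0)) = false := by
    simp
  simp only [Function.comp_def, hself]
  rfl

-- the outer i-loop invariant
theorem pv_outer (sums : List Int) (m : Nat) (hm : m ≤ sums.length) :
    ((List.range m).map (fun (k : Nat) => (k : Int))).foldl
        (fun rank i =>
          (PySem.List.pyRange (i + 1) (sums.length : Int) 1).foldl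
            (fun rank j =>
              if PySem.List.pyGetD sums j 0 > PySem.List.pyGetD sums i 0 then
                PySem.List.pySetD rank i (PySem.List.pyGetD rank i 0 + 1)
              else rank)
            ((PySem.List.pyRange 0 i 1).foldl
              (fun rank j =>
                if PySem.List.pyGetD sums j 0 > PySem.List.pyGetD sums i 0 then
                  PySem.List.pySetD rank i (PySem.List.pyGetD rank i 0 + 1)
                else rank) rank))
        (List.replicate sums.length (1 : Int))
      = (List.range sums.length).map
          (fun k => if k < m then
              1 + ((sums.countP (fun t => PySem.List.pyGetD sums (k : Int) 0 < t) : Nat) : Int)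
            else 1) := by
  induction m with
  | zero =>
    simp only [List.range_zero, List.map_nil, List.foldl_nil, Nat.not_lt_zero, if_false]
    rw [List.map_const', List.length_range]
  | succ m ih =>
    have hm' : m < sums.length := hm
    rw [List.range_succ, List.map_append, List.foldl_append, ih hm'.le]
    simp only [List.map_cons, List.map_nil, List.foldl_cons, List.foldl_nil]
    set P := (List.range sums.length).map
        (fun k => if k < m then
            1 + ((sums.countP (fun t => PySem.List.pyGetD sums (k : Int) 0 < t) : Nat) : Int)
          else 1) with hP
    have hPlen : P.length = sums.length := by
      rw [hP, List.length_map, List.length_range]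
    have hmP : m < P.length := by omega
    have hr1 : PySem.List.pyRange 0 (m : Int) 1
        = (List.range (m - 0)).map (fun (k : Nat) => ((0 : Nat) : Int) + (k : Int)) := by
      have := pv_range_nat 0 m; simpa using this
    have hr2 : PySem.List.pyRange ((m : Int) + 1) (sums.length : Int) 1
        = (List.range (sums.length - (m + 1))).map (fun (k : Nat) => (((m + 1 : Nat) : Nat) : Int) + (k : Int)) := by
      have := pv_range_nat (m + 1) sums.length
      push_cast at this ⊢
      simpa using this
    rw [hr1, pv_inner_fold sums P m (m - 0) ((0 : Nat) : Int) hmP]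
    set c1 := ((List.range (m - 0)).map (fun (k : Nat) => ((0 : Nat) : Int) + (k : Int))).countP
        (fun j => PySem.List.pyGetD sums j 0 > PySem.List.pyGetD sums (m : Int) 0) with hc1
    rw [hr2, pv_inner_fold sums _ m (sums.length - (m + 1)) (((m + 1 : Nat) : Nat) : Int)
      (by rw [PySem.List.pySetD_natCast, List.length_set]; exact hmP)]
    set c2 := ((List.range (sums.length - (m + 1))).map (fun (k : Nat) => (((m + 1 : Nat) : Nat) : Int) + (k : Int))).countP
        (fun j => PySem.List.pyGetD sums j 0 > PySem.List.pyGetD sums (m : Int) 0) with hc2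
    have hgP : PySem.List.pyGetD P (m : Int) 0 = 1 := by
      rw [PySem.List.pyGetD_natCast, hP, PySem.List.getD_map_range _ _ _ _ hm']
      simp
    have hcnt : (c1 : Int) + (c2 : Int)
        = ((sums.countP (fun t => PySem.List.pyGetD sums (m : Int) 0 < t) : Nat) : Int) := by
      rw [hc1, hc2]
      exact_mod_cast pv_count_split sums m hm'
    rw [hgP]
    have hgS : PySem.List.pyGetD (PySem.List.pySetD P ((m : Nat) : Int) (1 + (c1 : Int))) ((m : Nat) : Int) 0
        = 1 + (c1 : Int) := by
      rw [PySem.List.pyGetD_pySetD_natCast _ _ _ _ _ hmP, if_pos rfl]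
    rw [hgS]
    simp only [PySem.List.pySetD_natCast, List.set_set]
    rw [add_assoc, hcnt]
    apply List.ext_getElem
    · simp [hPlen]
    · intro j hj1 hj2
      simp only [hP, List.getElem_set, List.getElem_map, List.getElem_range]
      by_cases hjm : m = j
      · subst hjm
        simp
      · rw [if_neg hjm]
        have h1 : (j < m + 1) ↔ (j < m) := by omega
        simp [h1]

-- the final identity for the port of A
theorem pv_A_eq_target (score : List (List Int)) :
    solution score
      = pvTarget (score.map (fun x => PySem.List.pyGetD x 0 0 + PySem.List.pyGetD x 1 0)) := by
  unfold solution
  simp only [PySem.List.foldl_append_singleton_eq_map, List.nil_append, PySem.List.len_eq]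
  set sums := score.map (fun x => PySem.List.pyGetD x 0 0 + PySem.List.pyGetD x 1 0) with hsums
  have hlen : score.length = sums.length := by rw [hsums, List.length_map]
  rw [hlen, PySem.List.pyRange_zero_natCast, pv_outer sums sums.length le_rfl]
  unfold pvTarget
  apply List.ext_getElem
  · simp
  · intro j hj1 hj2
    have hjn : j < sums.length := by simpa using hj1
    simp only [List.getElem_map, List.getElem_range, if_pos hjn]
    rw [PySem.List.pyGetD_natCast, List.getD_eq_getElem _ _ hjn]

-- ===== VERDICT (by name: the statement is the Claim_ definition above) =====
theorem solution_spec : Claim_equal_solution := by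
  intro score _ _
  unfold Spec_solution
  rw [pv_A_eq_target, pv_alt_eq_target]
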